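-- pv_equiv track=rewrite | github.com/devarshh/CodeSignal | The Core/1. Intro Gates/7. lateRide.py | solution
-- ===== SOURCE A (Python) =====
-- def solution(n):
--     hours = int(n / 60)
--     minutes = n % 60
--     temp = 0
--     while minutes:
--         temp += minutes % 10
--         minutes //= 10
--     while hours:
--         temp += hours % 10
--         hours //= 10
--     return temp
-- ===== SOURCE B (Python) =====
-- def solution(n):
--     hours = int(n / 60)
--     minutes = n % 60
--     return sum(int(c) for c in str(hours)) + sum(int(c) for c in str(minutes))
-- ===== Notes on version B (the rewrite author's own statement) =====
-- stated objective: simpler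
-- what changed: B replaces the two %10//=10 digit-peeling while-loops and explicit accumulator with a single expression that converts hours and minutes to their decimal strings and sums the digit characters.
-- outside the precondition, e.g. on solution(-60): A does not finish within the time limit, B raises ValueError
import Mathlib
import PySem

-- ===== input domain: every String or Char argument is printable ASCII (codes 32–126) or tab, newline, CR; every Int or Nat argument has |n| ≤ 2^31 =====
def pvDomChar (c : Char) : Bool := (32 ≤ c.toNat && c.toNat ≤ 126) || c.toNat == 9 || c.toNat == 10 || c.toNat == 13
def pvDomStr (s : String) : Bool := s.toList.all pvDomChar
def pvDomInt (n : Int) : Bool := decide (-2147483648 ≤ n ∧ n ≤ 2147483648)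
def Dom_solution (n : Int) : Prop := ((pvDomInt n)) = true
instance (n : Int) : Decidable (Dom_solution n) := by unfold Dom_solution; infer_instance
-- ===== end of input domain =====

-- B replaces A's two digit-peeling while-loops with a digit-character sum over the decimal
-- strings of hours and minutes (objective: simpler); equal on all n > -60 (A diverges otherwise).

-- ===== PORT A =====
-- the `while m: temp += m % 10; m //= 10` loop for a non-negative m (A's m is never negative
-- inside Pre_solution; on n ≤ -60 Python's loop never terminates, excluded by Pre_solution)
def digitLoopA (m : Nat) : Int :=
  if m = 0 then 0 else (↑(m % 10) : Int) + digitLoopA (m / 10)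
  decreasing_by exact Nat.div_lt_self (Nat.pos_of_ne_zero (by assumption)) (by norm_num)

def solution (n : Int) : Int :=
  -- int(n / 60): float division then truncation toward zero; exact = Int.tdiv on |n| ≤ 2^31
  let hours := n.tdiv 60
  let minutes := PySem.Int.mod n 60
  let temp := digitLoopA minutes.toNat  -- minutes = n % 60 ≥ 0 always
  temp + digitLoopA hours.toNat         -- hours ≥ 0 inside Pre_solution

-- ===== PORT B =====
-- sum(int(c) for c in s): int(c) = c.toNat - 48, exact on the digit characters produced by
-- str of a non-negative integer (inside Pre_solution both arguments are non-negative)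
def digitCharSum (cs : List Char) : Int :=
  cs.foldl (fun a c => a + ((c.toNat : Int) - 48)) 0

def solution_alt (n : Int) : Int :=
  let hours := n.tdiv 60                -- int(n / 60), as in A
  let minutes := PySem.Int.mod n 60
  digitCharSum (PySem.Int.toChars hours) + digitCharSum (PySem.Int.toChars minutes)

-- ===== PRECONDITION & SPEC =====
-- Pre_ excludes exactly n ≤ -60: there hours = int(n/60) < 0 and A's `while hours` loop
-- (hours //= 10 stays at -1) never terminates, so A returns on no such input.
def Pre_solution (n : Int) : Prop := -60 < n
instance (n : Int) : Decidable (Pre_solution n) := by unfold Pre_solution; infer_instance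
def pvWitness_solution : Int := (123)

def Spec_solution (n : Int) (out : Int) : Prop := out = solution_alt n
instance (n : Int) (out : Int) : Decidable (Spec_solution n out) := by unfold Spec_solution; infer_instance

-- ===== CLAIM (what is proved, stated in full; the proofs are below) =====
def Claim_equal_solution : Prop := ∀ (n : Int), Dom_solution n → Pre_solution n → Spec_solution n (solution n)

-- ===== LEMMAS AND PROOFS =====

theorem foldl_add_sum (f : Char → Int) (cs : List Char) : ∀ (a : Int),
    cs.foldl (fun a c => a + f c) a = a + (cs.map f).sum := by
  induction cs with
  | nil => simp
  | cons c cs ih => intro a; simp [ih, add_assoc]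

theorem digitCharSum_eq_sum (cs : List Char) :
    digitCharSum cs = (cs.map (fun c => ((c.toNat : Int) - 48))).sum := by
  unfold digitCharSum; rw [foldl_add_sum]; simp

theorem digitChar_val (d : Nat) (hd : d < 10) :
    ((Nat.digitChar d).toNat : Int) - 48 = (d : Int) := by
  interval_cases d <;> decide

-- the character sum of `toDigitsCore` output, given enough fuel
theorem toDigitsCore_charSum (f : Nat) : ∀ (k : Nat) (ds : List Char), k < 10 ^ f →
    ((Nat.toDigitsCore 10 f k ds).map (fun c => ((c.toNat : Int) - 48))).sum
      = (↑(k % 10) : Int) + digitLoopA (k / 10)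
        + (ds.map (fun c => ((c.toNat : Int) - 48))).sum := by
  induction f with
  | zero =>
      intro k ds hk
      have hk0 : k = 0 := by omega
      subst hk0
      simp [Nat.toDigitsCore, digitLoopA]
  | succ f ih =>
      intro k ds hk
      rw [Nat.toDigitsCore]
      by_cases h0 : k / 10 = 0
      · rw [if_pos h0, List.map_cons, List.sum_cons,
          digitChar_val _ (Nat.mod_lt _ (by norm_num)), h0]
        rw [digitLoopA]; simp
      · rw [if_neg h0, ih (k / 10) _ (by
          have : k < 10 * 10 ^ f := by simpa [pow_succ, mul_comm] using hk
          omega)]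
        rw [List.map_cons, List.sum_cons, digitChar_val _ (Nat.mod_lt _ (by norm_num))]
        conv_rhs => rw [digitLoopA]
        rw [if_neg h0]
        push_cast
        ring

theorem charSum_toDigits (k : Nat) :
    digitCharSum (Nat.toDigits 10 k) = digitLoopA k := by
  have hfuel : k < 10 ^ (k + 1) :=
    lt_of_lt_of_le (Nat.lt_pow_self (by norm_num))
      (Nat.pow_le_pow_right (by norm_num) (Nat.le_succ _))
  rw [digitCharSum_eq_sum, Nat.toDigits, toDigitsCore_charSum (k + 1) k [] hfuel]
  conv_rhs => rw [digitLoopA]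
  by_cases h0 : k = 0
  · subst h0; simp [digitLoopA]
  · rw [if_neg h0]; simp

theorem charSum_toChars (m : Int) (hm : 0 ≤ m) :
    digitCharSum (PySem.Int.toChars m) = digitLoopA m.toNat := by
  rw [PySem.Int.toChars, if_neg (by omega)]
  exact charSum_toDigits m.toNat

-- ===== VERDICT (by name: the statement is the Claim_ definition above) =====
theorem solution_spec : Claim_equal_solution := by
  intro n _ hpre
  unfold Spec_solution solution solution_alt
  show digitLoopA (PySem.Int.mod n 60).toNat + digitLoopA ((n.tdiv 60)).toNat
      = digitCharSum (PySem.Int.toChars (n.tdiv 60)) + digitCharSum (PySem.Int.toChars (PySem.Int.mod n 60))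
  have hmin : 0 ≤ PySem.Int.mod n 60 := by
    simp only [PySem.Int.mod]
    exact Int.fmod_nonneg_of_pos n (by norm_num)
  have hhrs : 0 ≤ n.tdiv 60 := by
    by_cases h : 0 ≤ n
    · exact Int.tdiv_nonneg h (by norm_num)
    · have hn : n = -(-n) := by ring
      have hz : (-n).tdiv 60 = 0 := Int.tdiv_eq_zero_of_lt (by omega) (by
        have : -60 < n := hpre
        omega)
      rw [hn, Int.neg_tdiv, hz]; norm_num
  rw [charSum_toChars _ hhrs, charSum_toChars _ hmin, add_comm]
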